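-- pv_equiv track=rewrite | github.com/ivanbedon75/PCI | src/sra_tool/validator.py | summarize_missing_critical_fields
-- ===== SOURCE A (Python) =====
-- def summarize_missing_critical_fields(
--     records: list[dict[str, str]],
-- ) -> dict[str, int]:
--     critical_fields = ["Title", "Year", "Source title", "DOI", "Abstract"]
--     summary: dict[str, int] = {}
--     for field in critical_fields:
--         missing = 0
--         for record in records:
--             value = str(record.get(field, "")).strip()
--             if not value or value.upper() == "NA":
--                 missing += 1
--         summary[field] = missing
--     return summary
-- ===== SOURCE B (Python) =====
-- def summarize_missing_critical_fields(
--     records: list[dict[str, str]],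
-- ) -> dict[str, int]:
--     critical_fields = ["Title", "Year", "Source title", "DOI", "Abstract"]
--
--     def is_missing(record, field):
--         value = str(record.get(field, "")).strip()
--         return not value or value.upper() == "NA"
--
--     # Stage 1: flatten into one event list of every missing (record, field) hit.
--     missing_events = [
--         field
--         for record in records
--         for field in critical_fields
--         if is_missing(record, field)
--     ]
--     # Stage 2: tally the event list per field.
--     return {field: missing_events.count(field) for field in critical_fields}
-- ===== Notes on version B (the rewrite author's own statement) =====
-- stated objective: alternative
-- what changed: Instead of A's per-field counter loops over records, B first flattens all missing hits into one event list and then tallies it with list.count per field, maintaining no counters at all.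
import Mathlib
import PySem

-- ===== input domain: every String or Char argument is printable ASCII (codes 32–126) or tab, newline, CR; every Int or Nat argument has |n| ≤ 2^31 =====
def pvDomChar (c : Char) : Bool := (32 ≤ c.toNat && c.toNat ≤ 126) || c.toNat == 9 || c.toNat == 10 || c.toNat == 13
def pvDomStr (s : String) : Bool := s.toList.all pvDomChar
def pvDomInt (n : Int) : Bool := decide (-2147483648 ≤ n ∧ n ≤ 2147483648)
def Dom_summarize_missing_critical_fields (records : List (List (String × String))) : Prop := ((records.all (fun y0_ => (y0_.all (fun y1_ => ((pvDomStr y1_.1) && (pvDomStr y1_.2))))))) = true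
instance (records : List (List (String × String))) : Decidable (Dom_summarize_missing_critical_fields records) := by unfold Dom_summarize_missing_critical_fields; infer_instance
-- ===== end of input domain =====

-- B replaces A's per-field counter loops by flattening all missing hits into one
-- event list and tallying it with list.count per field (objective: alternative).

-- ===== PORT A =====
-- value = str(record.get(field, "")).strip(); missing when empty or upper() == "NA"
def pvIsMissing (record : List (String × String)) (field : String) : Bool :=
  let value := PySem.Str.strip ((PySem.Dict.mk record).getD field "")
  value == "" || PySem.Str.upper value == "NA"

def summarize_missing_critical_fields (records : List (List (String × String))) : List (String × Int) :=
  let critical_fields := ["Title", "Year", "Source title", "DOI", "Abstract"]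
  let summary : PySem.Dict String Int :=
    critical_fields.foldl (fun summary field =>
      let missing : Int := records.foldl (fun missing record =>
        if pvIsMissing record field then missing + 1 else missing) 0
      summary.insert field missing) PySem.Dict.empty
  summary.items

-- ===== PORT B =====
def summarize_missing_critical_fields_alt (records : List (List (String × String))) : List (String × Int) :=
  let critical_fields := ["Title", "Year", "Source title", "DOI", "Abstract"]
  let missing_events : List String :=
    records.flatMap (fun record => critical_fields.filter (fun field => pvIsMissing record field))
  -- dict comprehension over the distinct critical_fields = association list in that order
  critical_fields.map (fun field => (field, (PySem.List.count missing_events field : Int)))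

-- ===== PRECONDITION & SPEC =====
def Spec_summarize_missing_critical_fields (records : List (List (String × String))) (out : List (String × Int)) : Prop := out = summarize_missing_critical_fields_alt records
instance (records : List (List (String × String))) (out : List (String × Int)) : Decidable (Spec_summarize_missing_critical_fields records out) := by unfold Spec_summarize_missing_critical_fields; infer_instance

-- ===== CLAIM (what is proved, stated in full; the proofs are below) =====
def Claim_equal_summarize_missing_critical_fields : Prop := ∀ (records : List (List (String × String))), Dom_summarize_missing_critical_fields records → Spec_summarize_missing_critical_fields records (summarize_missing_critical_fields records)

-- ===== LEMMAS AND PROOFS =====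

-- A's per-field counting loop equals the count of f in B's flattened event list.
lemma pvFoldCount (f : String)
    (hf : (["Title", "Year", "Source title", "DOI", "Abstract"].count f) = 1)
    (rs : List (List (String × String))) : ∀ (c : Int),
    rs.foldl (fun missing record => if pvIsMissing record f then missing + 1 else missing) c
    = c + ((rs.flatMap (fun record =>
        ["Title", "Year", "Source title", "DOI", "Abstract"].filter
          (fun field => pvIsMissing record field))).count f : Int) := by
  induction rs with
  | nil => intro c; simp
  | cons r rs ih =>
      intro c
      have hcf : (List.filter (fun field => pvIsMissing r field)
          ["Title", "Year", "Source title", "DOI", "Abstract"]).count f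
          = if pvIsMissing r f then 1 else 0 := by
        by_cases h : pvIsMissing r f
        · rw [if_pos h, List.count_filter h, hf]
        · rw [if_neg h, List.count_eq_zero]
          simp [List.mem_filter, h]
      rw [List.foldl_cons, ih, List.flatMap_cons, List.count_append, hcf]
      split_ifs <;> push_cast <;> ring

-- ===== VERDICT (by name: the statement is the Claim_ definition above) =====
theorem summarize_missing_critical_fields_spec : Claim_equal_summarize_missing_critical_fields := by
  intro records _
  unfold Spec_summarize_missing_critical_fields
  show summarize_missing_critical_fields records = summarize_missing_critical_fields_alt records
  unfold summarize_missing_critical_fields summarize_missing_critical_fields_alt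
  simp only [List.foldl, List.map, PySem.List.count]
  rw [pvFoldCount "Title" (by decide), pvFoldCount "Year" (by decide),
      pvFoldCount "Source title" (by decide), pvFoldCount "DOI" (by decide),
      pvFoldCount "Abstract" (by decide)]
  simp only [zero_add]
  rfl
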